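-- pv_equiv track=rewrite | github.com/ZekeMiller/euler-solutions | solutions/074_digit_fact_chains/digit_fact_chains.py | gen_fact_chains
-- ===== SOURCE A (Python) =====
-- FACTORIALS = [1, 1, 2, 6, 24, 120, 720, 5040, 40320, 362880]
--
-- def digit_fact_sum(n):
--     return sum([FACTORIALS[int(i)] for i in str(n)])
--
-- def gen_fact_chains(n):
--     # the number of unique numbers that are generated from n
--     # e.g. self loop = 1
--     # dictionary so we can go above the bound of our array
--     # without extra effort (e.g. digitFactSum(999999) > 2 million)
--     chainlens = {}
--     # simplify recursive code since we know all >1 loops ahead of time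
--     chainlens[169] = 3
--     chainlens[363601] = 3
--     chainlens[1454] = 3
--     chainlens[871] = 2
--     chainlens[45361] = 2
--     chainlens[872] = 2
--     chainlens[45362] = 872
--     for i in range(n):
--         gen_fact_chain_rec(i, chainlens)
--     return chainlens
--
-- def gen_fact_chain_rec(i, chainlens):
--     if i in chainlens:
--         return
--     nextI = digit_fact_sum(i)
--     if i == nextI:
--         chainlens[i] = 1
--         return
--     gen_fact_chain_rec(nextI, chainlens)
--     chainlens[i] = 1 + chainlens[nextI]
-- ===== SOURCE B (Python) =====
-- FACTORIALS = [1, 1, 2, 6, 24, 120, 720, 5040, 40320, 362880]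
--
--
-- def digit_fact_sum(n):
--     return sum([FACTORIALS[int(i)] for i in str(n)])
--
--
-- def gen_fact_chains(n):
--     # same seven seed entries as the original (including 45362: 872)
--     chainlens = {169: 3, 363601: 3, 1454: 3, 871: 2, 45361: 2, 872: 2, 45362: 872}
--     for i in range(n):
--         # iterative walk: collect the unseen prefix of the chain on a path list
--         path = []
--         cur = i
--         while cur not in chainlens:
--             nxt = digit_fact_sum(cur)
--             if cur == nxt:
--                 chainlens[cur] = 1
--                 break
--             path.append(cur)
--             cur = nxt
--         # assign lengths walking the path backward
--         for node in reversed(path):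
--             chainlens[node] = 1 + chainlens[digit_fact_sum(node)]
--     return chainlens
-- ===== Notes on version B (the rewrite author's own statement) =====
-- stated objective: alternative
-- what changed: Replaces the recursive memoized chain helper with an iterative forward walk that collects the unseen chain prefix on a path list and then assigns lengths in one backward pass over it, keeping the same seed dict (including 45362:872).
import Mathlib
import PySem

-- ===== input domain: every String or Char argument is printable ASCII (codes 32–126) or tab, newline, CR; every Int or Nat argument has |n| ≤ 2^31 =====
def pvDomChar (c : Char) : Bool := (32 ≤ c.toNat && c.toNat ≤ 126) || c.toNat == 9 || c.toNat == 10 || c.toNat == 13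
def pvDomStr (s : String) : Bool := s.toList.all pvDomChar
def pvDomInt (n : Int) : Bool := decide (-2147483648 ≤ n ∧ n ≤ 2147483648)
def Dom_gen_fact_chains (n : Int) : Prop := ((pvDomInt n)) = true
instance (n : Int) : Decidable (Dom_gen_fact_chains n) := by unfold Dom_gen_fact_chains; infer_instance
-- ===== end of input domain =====

-- B replaces A's recursive memoized chain walk by an iterative forward walk that collects a path
-- and then assigns lengths on a backward pass (objective: alternative decomposition, same cost).

-- ===== PORT A =====
def FACTORIALS : List Int := [1, 1, 2, 6, 24, 120, 720, 5040, 40320, 362880]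

-- sum([FACTORIALS[int(i)] for i in str(n)]); the two '.getD 0' sit where Python would raise
-- (non-digit char / out-of-range index), which never happens for the chars str of a nonneg int produces
def digit_fact_sum (n : Int) : Int :=
  ((PySem.Int.toChars n).map (fun c =>
    (PySem.List.pyGet? FACTORIALS ((PySem.Int.ofChars? [c]).getD 0)).getD 0)).sum

-- fuel bounding the chain-following depth: Python's recursion (A) / while loop (B) is unbounded;
-- the fuel only makes the ports total and is never exhausted on chains Python actually follows
def pvFuel : Nat := 100000000

def gen_fact_chain_rec : Nat → Int → PySem.Dict Int Int → PySem.Dict Int Int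
  | 0, _, d => d
  | f + 1, i, d =>
    if d.contains i then d
    else
      let nextI := digit_fact_sum i
      if i = nextI then d.insert i 1
      else
        let d' := gen_fact_chain_rec f nextI d
        match d'.get? nextI with        -- chainlens[nextI] (KeyError unreachable in Python)
        | some v => d'.insert i (1 + v)
        | none => d'

def gen_fact_chains (n : Int) : List (Int × Int) :=
  let chainlens : PySem.Dict Int Int := PySem.Dict.empty
  let chainlens := chainlens.insert 169 3
  let chainlens := chainlens.insert 363601 3
  let chainlens := chainlens.insert 1454 3
  let chainlens := chainlens.insert 871 2
  let chainlens := chainlens.insert 45361 2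
  let chainlens := chainlens.insert 872 2
  let chainlens := chainlens.insert 45362 872
  ((PySem.List.pyRange 0 n 1).foldl (fun d i => gen_fact_chain_rec pvFuel i d) chainlens).items

-- ===== PORT B =====
def digit_fact_sum_alt (n : Int) : Int :=
  ((PySem.Int.toChars n).map (fun c =>
    (PySem.List.pyGet? FACTORIALS ((PySem.Int.ofChars? [c]).getD 0)).getD 0)).sum

-- the while loop: follow the chain, pushing unseen nodes onto path, until a memoized node
-- or a self-loop (which gets length 1); fuel 0 = Python's loop still running (unreachable)
def walk_alt : Nat → Int → PySem.Dict Int Int → List Int → PySem.Dict Int Int × List Int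
  | 0, _, d, path => (d, path)
  | f + 1, cur, d, path =>
    if d.contains cur then (d, path)
    else
      let nxt := digit_fact_sum_alt cur
      if cur = nxt then (d.insert cur 1, path)
      else walk_alt f nxt d (path ++ [cur])

def gen_fact_chains_alt (n : Int) : List (Int × Int) :=
  let chainlens : PySem.Dict Int Int :=
    PySem.Dict.ofList [(169, 3), (363601, 3), (1454, 3), (871, 2), (45361, 2), (872, 2), (45362, 872)]
  ((PySem.List.pyRange 0 n 1).foldl (fun d i =>
      let r := walk_alt pvFuel i d []
      r.2.reverse.foldl (fun d node =>
        match d.get? (digit_fact_sum_alt node) with   -- chainlens[digit_fact_sum(node)]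
        | some v => d.insert node (1 + v)
        | none => d) r.1) chainlens).items

-- ===== PRECONDITION & SPEC =====
def Spec_gen_fact_chains (n : Int) (out : List (Int × Int)) : Prop := out = gen_fact_chains_alt n
instance (n : Int) (out : List (Int × Int)) : Decidable (Spec_gen_fact_chains n out) := by unfold Spec_gen_fact_chains; infer_instance

-- ===== CLAIM (what is proved, stated in full; the proofs are below) =====
def Claim_equal_gen_fact_chains : Prop := ∀ (n : Int), Dom_gen_fact_chains n → Spec_gen_fact_chains n (gen_fact_chains n)

-- ===== LEMMAS AND PROOFS =====

-- one backward-assignment step of B; it is also exactly one unwinding frame of A's recursion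
def pvStep (d : PySem.Dict Int Int) (node : Int) : PySem.Dict Int Int :=
  match d.get? (digit_fact_sum_alt node) with
  | some v => d.insert node (1 + v)
  | none => d

-- B's walk-then-backward-pass computes A's recursion, for every fuel, dict and pending path
lemma walk_post (f : Nat) : ∀ (cur : Int) (d : PySem.Dict Int Int) (path : List Int),
    (walk_alt f cur d path).2.reverse.foldl pvStep (walk_alt f cur d path).1
      = path.reverse.foldl pvStep (gen_fact_chain_rec f cur d) := by
  induction f with
  | zero => intro cur d path; rfl
  | succ f ih =>
    intro cur d path
    have hdfs : digit_fact_sum = digit_fact_sum_alt := rfl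
    simp only [walk_alt, gen_fact_chain_rec, hdfs]
    by_cases hc : d.contains cur
    · simp [hc]
    · simp only [hc, if_false, Bool.false_eq_true]
      by_cases hs : cur = digit_fact_sum_alt cur
      · rw [if_pos hs, if_pos hs]
      · simp only [hs, if_false]
        rw [ih]
        simp [pvStep]
theorem gen_fact_chains_spec : Claim_equal_gen_fact_chains := by
  intro n _
  unfold Spec_gen_fact_chains gen_fact_chains gen_fact_chains_alt
  have h : (fun (d : PySem.Dict Int Int) (i : Int) =>
        let r := walk_alt pvFuel i d []
        r.2.reverse.foldl (fun d node =>
          match d.get? (digit_fact_sum_alt node) with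
          | some v => d.insert node (1 + v)
          | none => d) r.1)
      = fun d i => gen_fact_chain_rec pvFuel i d := by
    funext d i
    exact (walk_post pvFuel i d []).symm ▸ rfl
  rw [h]
  rfl
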